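-- pv_equiv track=rewrite | github.com/karansinghneu/CS-6200-IR | IR-Final-Project/Phase2/SnippetGeneration.py | snippet_highlight
-- ===== SOURCE A (Python) =====
-- def snippet_highlight(snippet, query_terms):
--     '''
--     This method will highglight the snippet where ever the respective query words are found.
--     :param snippet: the snippet generated from the above technique.
--     :param query_terms: the terms in the query.
--     :return: returns the resultant snippet.
--     '''
--     highlight_terms = []
--     for s in snippet.split():
--         if s.lower() in query_terms:
--             highlight_terms.append('<b>' + s + '</b>')
--         else:
--             highlight_terms.append(s)
--     res = (' '.join(highlight_terms))
--     res = res.replace("</b> <b>", " ")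
--     return res
-- ===== SOURCE B (Python) =====
-- def snippet_highlight(snippet, query_terms):
--     out = []
--     run = []
--     for w in snippet.split():
--         if w.lower() in query_terms:
--             run.append(w)
--         else:
--             if run:
--                 out.append('<b>' + ' '.join(run) + '</b>')
--                 run = []
--             out.append(w)
--     if run:
--         out.append('<b>' + ' '.join(run) + '</b>')
--     return ' '.join(out)
-- ===== Notes on version B (the rewrite author's own statement) =====
-- stated objective: alternative
-- what changed: B builds the merged bold spans directly in one pass over snippet.split() with a run buffer of consecutive matched words, instead of A's wrap-every-matched-word followed by a textual str.replace('</b> <b>', ' ') merge pass.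
-- intended difference: On snippets where two adjacent words textually mimic the markup without both being query terms (a word ending in '</b>' before a query term or a '<b>'-starting word, or a query term before a non-term word starting with '<b>'), A's textual replace merges across the fake tags (e.g. snippet 'a</b> x', query ['x'] gives 'a x</b>'), while B returns the correctly tagged 'a</b> <b>x</b>', which is the intended highlighting. — e.g. on snippet_highlight("a</b> x", ["x"]): A returns "a x</b>", B returns "a</b> <b>x</b>"
import Mathlib
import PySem

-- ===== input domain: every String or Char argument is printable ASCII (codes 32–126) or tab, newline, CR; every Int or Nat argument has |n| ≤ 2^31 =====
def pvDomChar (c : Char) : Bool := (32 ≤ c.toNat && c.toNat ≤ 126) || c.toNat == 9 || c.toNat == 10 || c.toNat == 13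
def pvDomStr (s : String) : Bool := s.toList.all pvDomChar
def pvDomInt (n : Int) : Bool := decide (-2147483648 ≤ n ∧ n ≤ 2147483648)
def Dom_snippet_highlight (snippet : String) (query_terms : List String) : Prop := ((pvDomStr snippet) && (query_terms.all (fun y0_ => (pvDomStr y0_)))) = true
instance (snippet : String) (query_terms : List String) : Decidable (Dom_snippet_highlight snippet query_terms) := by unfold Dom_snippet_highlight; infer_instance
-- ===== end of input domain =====

-- B replaces A's wrap-every-word-then-textual-replace('</b> <b>') merge by a single pass that groups
-- consecutive matched words into one bold span; on snippets whose words textually mimic the markup next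
-- to a match, A's replace merges across the fake tags while B keeps them (see D_ below).


-- shared small definitions (used by the ports and by D_)
def pvTagO : List Char := ['<', 'b', '>']                      -- "<b>"
def pvTagC : List Char := ['<', '/', 'b', '>']                 -- "</b>"
def pvM (query_terms : List String) (t : List Char) : Bool :=
  (query_terms.map String.toList).contains (PySem.Chars.lower t)   -- t.lower() in query_terms

-- ===== PORT A =====
def snippet_highlight (snippet : String) (query_terms : List String) : String :=
  let highlight_terms := (PySem.Chars.split₀ snippet.toList).foldl
    (fun acc s => if pvM query_terms s then acc ++ [pvTagO ++ s ++ pvTagC] else acc ++ [s]) []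
  let res := PySem.Chars.join [' '] highlight_terms
  String.ofList (PySem.Chars.replace res "</b> <b>".toList " ".toList)

-- ===== PORT B =====
def snippet_highlight_alt (snippet : String) (query_terms : List String) : String :=
  let p := (PySem.Chars.split₀ snippet.toList).foldl
    (fun (p : List (List Char) × List (List Char)) w =>
      if pvM query_terms w then (p.1, p.2 ++ [w])
      else if p.2.isEmpty then (p.1 ++ [w], p.2)
      else ((p.1 ++ [pvTagO ++ PySem.Chars.join [' '] p.2 ++ pvTagC]) ++ [w], []))
    ([], [])
  let out := if p.2.isEmpty then p.1 else p.1 ++ [pvTagO ++ PySem.Chars.join [' '] p.2 ++ pvTagC]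
  String.ofList (PySem.Chars.join [' '] out)

-- ===== PRECONDITION & SPEC =====
-- On snippets where two adjacent words textually mimic the markup without both being query terms
-- (a word ending in "</b>" before a query term or a "<b>"-starting word, or a query term before a
-- non-term word starting with "<b>"), A's textual replace merges across the fake tags (snippet
-- "a</b> x" with query ["x"] gives "a x</b>") while B returns the correctly tagged
-- "a</b> <b>x</b>", which is the intended highlighting.
def D_snippet_highlight (snippet : String) (query_terms : List String) : Prop :=
  let m := pvM query_terms
  let ts := PySem.Chars.split₀ snippet.toList
  ((ts.zip ts.tail).any fun p =>
    (m p.1 || PySem.Chars.endswith p.1 pvTagC) && (m p.2 || PySem.Chars.startswith p.2 pvTagO) &&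
      !(m p.1 && m p.2)) = true
instance (snippet : String) (query_terms : List String) : Decidable (D_snippet_highlight snippet query_terms) := by
  unfold D_snippet_highlight; infer_instance

def Spec_snippet_highlight (snippet : String) (query_terms : List String) (out : String) : Prop :=
  ¬ D_snippet_highlight snippet query_terms → out = snippet_highlight_alt snippet query_terms
instance (snippet : String) (query_terms : List String) (out : String) : Decidable (Spec_snippet_highlight snippet query_terms out) := by
  unfold Spec_snippet_highlight; infer_instance

def pvDiffWitness_snippet_highlight : String × List String := ("a</b> x", ["x"])
def pvDiffWitnessOut_snippet_highlight : String × String := ("a x</b>", "a</b> <b>x</b>")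

-- ===== CLAIM (what is proved, stated in full; the proofs are below) =====
def Claim_unchanged_snippet_highlight : Prop := ∀ (snippet : String) (query_terms : List String), Dom_snippet_highlight snippet query_terms → Spec_snippet_highlight snippet query_terms (snippet_highlight snippet query_terms)
def Claim_changed_snippet_highlight : Prop := Dom_snippet_highlight (pvDiffWitness_snippet_highlight.1) (pvDiffWitness_snippet_highlight.2) ∧ D_snippet_highlight (pvDiffWitness_snippet_highlight.1) (pvDiffWitness_snippet_highlight.2) ∧ snippet_highlight (pvDiffWitness_snippet_highlight.1) (pvDiffWitness_snippet_highlight.2) = pvDiffWitnessOut_snippet_highlight.1 ∧ snippet_highlight_alt (pvDiffWitness_snippet_highlight.1) (pvDiffWitness_snippet_highlight.2) = pvDiffWitnessOut_snippet_highlight.2 ∧ pvDiffWitnessOut_snippet_highlight.1 ≠ pvDiffWitnessOut_snippet_highlight.2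

-- ===== LEMMAS AND PROOFS =====

def pvPat : List Char := ['<', '/', 'b', '>', ' ', '<', 'b', '>']
def pvRepl (l : List Char) : List Char :=
  if h : pvPat <+: l then ' ' :: pvRepl (l.drop 8)
  else match l with
    | [] => []
    | c :: t => c :: pvRepl t
termination_by l.length
decreasing_by
  · have := h.length_le; simp [pvPat] at this; simp; omega
  · simp

lemma pvRepl_nil : pvRepl [] = [] := by unfold pvRepl; simp [pvPat]

lemma pvRepl_cons_pos {l : List Char} (h : pvPat <+: l) : pvRepl l = ' ' :: pvRepl (l.drop 8) := by
  rw [pvRepl, dif_pos h]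

lemma pvRepl_cons_neg {c : Char} {t : List Char} (h : ¬ pvPat <+: (c :: t)) :
    pvRepl (c :: t) = c :: pvRepl t := by
  rw [pvRepl, dif_neg h]

lemma pvGo_eq_repl : ∀ (fuel : Nat) (l acc : List Char), l.length ≤ fuel →
    PySem.Chars.replace.go pvPat [' '] fuel l acc = acc.reverse ++ pvRepl l := by
  intro fuel
  induction fuel with
  | zero =>
    intro l acc h
    have : l = [] := by cases l <;> simp_all
    subst this
    rw [PySem.Chars.replace.go, pvRepl_nil]
  | succ n ih =>
    intro l acc h
    cases l with
    | nil =>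
      rw [PySem.Chars.replace.go, pvRepl_nil]
      simp; omega
    | cons c t =>
      rw [PySem.Chars.replace.go]
      by_cases hp : pvPat <+: (c :: t)
      · rw [if_pos (by exact List.isPrefixOf_iff_prefix.mpr hp)]
        rw [ih _ _ (by simp [pvPat] at h ⊢; omega)]
        rw [pvRepl_cons_pos hp]
        simp [pvPat]
      · rw [if_neg (by simp [List.isPrefixOf_iff_prefix]; exact hp)]
        rw [ih _ _ (by simp at h ⊢; omega)]
        rw [pvRepl_cons_neg hp]
        simp

lemma pvReplace_eq : ∀ s : List Char, PySem.Chars.replace s pvPat [' '] = pvRepl s := by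
  intro s
  unfold PySem.Chars.replace
  rw [if_neg (by simp [pvPat])]
  exact pvGo_eq_repl s.length s [] (le_refl _)

lemma pvRepl_spaceless (l : List Char) (h : ' ' ∉ l) : pvRepl l = l := by
  induction l with
  | nil => exact pvRepl_nil
  | cons c t ih =>
    simp at h
    have hnp : ¬ pvPat <+: (c :: t) := by
      intro hp
      have := hp.subset (show ' ' ∈ pvPat by simp [pvPat])
      simp at this
      rcases this with h1 | h2
      · exact h.1 h1
      · exact h.2 h2
    rw [pvRepl_cons_neg hnp, ih h.2]

lemma pvStartsO_append (x y : List Char) : pvTagO <+: (x ++ ' ' :: y) ↔ pvTagO <+: x := by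
  rcases x with _ | ⟨a, _ | ⟨b, _ | ⟨c, t⟩⟩⟩ <;>
    simp [pvTagO, List.cons_prefix_cons]

lemma pvJoin_cons (a : List Char) (l : List (List Char)) :
    PySem.Chars.join [' '] (a :: l) = a ++ (if l = [] then [] else ' ' :: PySem.Chars.join [' '] l) := by
  cases l with
  | nil => simp [PySem.Chars.join_singleton]
  | cons b l => rw [PySem.Chars.join_cons_cons]; simp

lemma pvSplit_go_nospace : ∀ (l cur : List Char) (acc : List (List Char)),
    (∀ t ∈ acc, ' ' ∉ t) → (' ' ∉ cur) →
    ∀ t ∈ PySem.Chars.split₀.go l cur acc, ' ' ∉ t := by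
  intro l
  induction l with
  | nil =>
    intro cur acc hacc hcur t ht
    rw [PySem.Chars.split₀.go] at ht
    by_cases hc : cur.isEmpty
    · rw [if_pos hc] at ht
      simp at ht
      exact hacc t ht
    · rw [if_neg hc] at ht
      simp at ht
      rcases ht with ht | ht
      · exact hacc t ht
      · subst ht; simp [hcur]
  | cons c rest ih =>
    intro cur acc hacc hcur t ht
    rw [PySem.Chars.split₀.go] at ht
    by_cases hs : PySem.Chars.isspace c
    · rw [if_pos hs] at ht
      by_cases hc : cur.isEmpty
      · rw [if_pos hc] at ht
        exact ih [] acc hacc (by simp) t ht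
      · rw [if_neg hc] at ht
        refine ih [] (cur.reverse :: acc) ?_ (by simp) t ht
        intro u hu
        simp at hu
        rcases hu with hu | hu
        · subst hu; simp [hcur]
        · exact hacc u hu
    · rw [if_neg hs] at ht
      refine ih (c :: cur) acc hacc ?_ t ht
      intro hmem
      simp at hmem
      rcases hmem with hmem | hmem
      · subst hmem; exact hs (by decide)
      · exact hcur hmem

lemma pvSplit_nospace (l : List Char) : ∀ t ∈ PySem.Chars.split₀ l, ' ' ∉ t := by
  intro t ht
  exact pvSplit_go_nospace l [] [] (by simp) (by simp) t ht

lemma pvRepl_junction (r s : List Char) (hr : ' ' ∉ r) :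
    pvRepl (r ++ ' ' :: s) =
      if pvTagC <:+ r ∧ pvTagO <+: s then r.take (r.length - 4) ++ ' ' :: pvRepl (s.drop 3)
      else r ++ ' ' :: pvRepl s := by
  induction r with
  | nil =>
    rw [if_neg (by simp [pvTagC])]
    simp only [List.nil_append]
    rw [pvRepl_cons_neg (by simp [pvPat, List.cons_prefix_cons])]
  | cons c r' ih =>
    by_cases hp : pvPat <+: (c :: r' ++ ' ' :: s)
    · rcases r' with _ | ⟨a1, _ | ⟨a2, _ | ⟨a3, _ | ⟨d, r''⟩⟩⟩⟩ <;>
        simp [pvPat, List.cons_prefix_cons] at hp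
      · -- r = [c,a1,a2,a3] = "</b>", s starts with "<b>"
        obtain ⟨hc, h1, h2, h3, hO⟩ := hp
        subst hc; subst h1; subst h2; subst h3
        rw [pvRepl_cons_pos (by simp [pvPat, List.cons_prefix_cons]; exact hO)]
        rw [if_pos ⟨by simp [pvTagC], by simpa [pvTagO] using hO⟩]
        simp
      · -- d = ' ' would be a space inside r
        exact absurd hp.2.2.2.2.1 (by simp at hr; tauto)
    · have hr' : ' ' ∉ r' := by simp at hr; tauto
      have hstep : pvRepl (c :: r' ++ ' ' :: s) = c :: pvRepl (r' ++ ' ' :: s) :=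
        pvRepl_cons_neg hp
      rw [hstep, ih hr']
      by_cases hc : pvTagC <:+ r' ∧ pvTagO <+: s
      · rw [if_pos hc, if_pos ⟨List.suffix_cons_iff.mpr (Or.inr hc.1), hc.2⟩]
        have h4 : 4 ≤ r'.length := by simpa [pvTagC] using hc.1.length_le
        have hlen : (c :: r').length - 4 = (r'.length - 4) + 1 := by simp; omega
        rw [hlen, List.take_succ_cons]
        simp
      · rw [if_neg hc, if_neg ?_]
        · simp
        · rintro ⟨hC, hO⟩
          rcases List.suffix_cons_iff.mp hC with heq | hsuf
          · obtain ⟨u, hu⟩ := hO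
            apply hp
            refine ⟨u, ?_⟩
            have hc' : c = '<' ∧ r' = ['/', 'b', '>'] := by
              have := heq.symm
              simp [pvTagC] at this
              tauto
            rw [hc'.1, hc'.2, ← hu]
            simp [pvPat, pvTagO]
          · exact hc ⟨hsuf, hO⟩

def pvBad (query_terms : List String) (t1 t2 : List Char) : Prop :=
  ((pvM query_terms t1 = true ∨ pvTagC <:+ t1) ∧ (pvM query_terms t2 = true ∨ pvTagO <+: t2)) ∧
    ¬(pvM query_terms t1 = true ∧ pvM query_terms t2 = true)

def pvRender (q : List String) (t : List Char) : List Char :=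
  if pvM q t then pvTagO ++ t ++ pvTagC else t

def pvRuns (q : List String) : List (List Char) → List (List Char) → List (List Char)
  | run, [] => if run.isEmpty then [] else [pvTagO ++ PySem.Chars.join [' '] run ++ pvTagC]
  | run, w :: ts =>
    if pvM q w then pvRuns q (run ++ [w]) ts
    else if run.isEmpty then w :: pvRuns q [] ts
    else (pvTagO ++ PySem.Chars.join [' '] run ++ pvTagC) :: w :: pvRuns q [] ts

def pvBsem (q : List String) (inBold : Bool) : List (List Char) → List Char
  | [] => if inBold then pvTagC else []
  | w :: ts =>
    if pvM q w then
      (if inBold then ' ' :: (w ++ pvBsem q true ts) else ' ' :: (pvTagO ++ w ++ pvBsem q true ts))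
    else
      (if inBold then pvTagC ++ ' ' :: (w ++ pvBsem q false ts) else ' ' :: (w ++ pvBsem q false ts))

def pvBtop (q : List String) : List (List Char) → List Char
  | [] => []
  | w :: ts => if pvM q w then pvTagO ++ w ++ pvBsem q true ts else w ++ pvBsem q false ts

-- A's first loop is map pvRender
lemma pvAfold (q : List String) (ts : List (List Char)) :
    ts.foldl (fun acc s => if pvM q s then acc ++ [pvTagO ++ s ++ pvTagC] else acc ++ [s]) [] =
      ts.map (pvRender q) := by
  have h : (fun (acc : List (List Char)) s => if pvM q s then acc ++ [pvTagO ++ s ++ pvTagC] else acc ++ [s]) =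
      fun acc s => acc ++ [pvRender q s] := by
    funext acc s
    unfold pvRender
    split <;> rfl
  rw [h, PySem.List.foldl_append_singleton_eq_map]
  simp

-- B's loop computes pvRuns
lemma pvBfold (q : List String) (ts : List (List Char)) :
    ∀ (out run : List (List Char)),
      (let p := ts.foldl (fun (p : List (List Char) × List (List Char)) w =>
        if pvM q w then (p.1, p.2 ++ [w])
        else if p.2.isEmpty then (p.1 ++ [w], p.2)
        else ((p.1 ++ [pvTagO ++ PySem.Chars.join [' '] p.2 ++ pvTagC]) ++ [w], [])) (out, run)
       (if p.2.isEmpty then p.1 else p.1 ++ [pvTagO ++ PySem.Chars.join [' '] p.2 ++ pvTagC])) =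
      out ++ pvRuns q run ts := by
  induction ts with
  | nil =>
    intro out run
    simp only [List.foldl_nil, pvRuns]
    by_cases h : run.isEmpty <;> simp [h]
  | cons w ts ih =>
    intro out run
    simp only [List.foldl_cons]
    by_cases hm : pvM q w
    · simp only [if_pos hm]
      rw [ih out (run ++ [w])]
      simp [pvRuns, hm]
    · simp only [if_neg hm]
      by_cases he : run.isEmpty
      · simp only [if_pos he]
        rw [ih (out ++ [w]) run]
        have : run = [] := by simpa using he
        subst this
        simp [pvRuns, hm]
      · simp only [if_neg he]
        rw [ih _ []]
        simp [pvRuns, hm, he]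

lemma pvRuns_ne (q : List String) : ∀ (ts run : List (List Char)), run ≠ [] → pvRuns q run ts ≠ [] := by
  intro ts
  induction ts with
  | nil => intro run h; simp [pvRuns, h]
  | cons w ts ih =>
    intro run h
    by_cases hm : pvM q w
    · simpa [pvRuns, hm] using ih (run ++ [w]) (by simp)
    · simp [pvRuns, hm, show ¬ run.isEmpty by simpa using h]

lemma pvJoin_append_singleton (w : List Char) :
    ∀ run : List (List Char), run ≠ [] →
      PySem.Chars.join [' '] (run ++ [w]) = PySem.Chars.join [' '] run ++ ' ' :: w := by
  intro run
  induction run with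
  | nil => simp
  | cons a r ih =>
    intro _
    rcases r with _ | ⟨b, r'⟩
    · rw [PySem.Chars.join_singleton]
      simpa using PySem.Chars.join_cons_cons [' '] a w []
    · rw [List.cons_append, pvJoin_cons, pvJoin_cons (l := b :: r')]
      rw [if_neg (by simp), if_neg (by simp)]
      rw [ih (by simp)]
      simp

lemma pvSB (q : List String) : ∀ ts : List (List Char),
    (∀ run : List (List Char), run ≠ [] →
      PySem.Chars.join [' '] (pvRuns q run ts) =
        pvTagO ++ PySem.Chars.join [' '] run ++ pvBsem q true ts) ∧
    ((if pvRuns q [] ts = [] then [] else ' ' :: PySem.Chars.join [' '] (pvRuns q [] ts)) =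
      pvBsem q false ts) := by
  intro ts
  induction ts with
  | nil =>
    constructor
    · intro run h
      simp [pvRuns, pvBsem, show ¬ run.isEmpty by simpa using h]
    · simp [pvRuns, pvBsem]
  | cons w ts ih =>
    constructor
    · intro run h
      by_cases hm : pvM q w
      · rw [show pvRuns q run (w :: ts) = pvRuns q (run ++ [w]) ts by simp [pvRuns, hm]]
        rw [(ih.1) (run ++ [w]) (by simp)]
        rw [pvJoin_append_singleton w run h]
        simp [pvBsem, hm]
      · rw [show pvRuns q run (w :: ts) =
            (pvTagO ++ PySem.Chars.join [' '] run ++ pvTagC) :: w :: pvRuns q [] ts by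
          simp [pvRuns, hm, show ¬ run.isEmpty by simpa using h]]
        rw [pvJoin_cons, pvJoin_cons]
        rw [if_neg (by simp), ih.2]
        simp [pvBsem, hm]
    · by_cases hm : pvM q w
      · rw [show pvRuns q [] (w :: ts) = pvRuns q [w] ts by simp [pvRuns, hm]]
        rw [if_neg (pvRuns_ne q ts [w] (by simp))]
        rw [(ih.1) [w] (by simp), PySem.Chars.join_singleton]
        simp [pvBsem, hm]
      · rw [show pvRuns q [] (w :: ts) = w :: pvRuns q [] ts by simp [pvRuns, hm]]
        rw [if_neg (by simp), pvJoin_cons]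
        by_cases he : pvRuns q [] ts = []
        · rw [if_pos he]
          rw [he] at ih
          simp at ih
          simp [pvBsem, hm, ← ih.2]
        · rw [if_neg he]
          have h2 := ih.2
          rw [if_neg he] at h2
          simp [pvBsem, hm, ← h2]

lemma pvRender_spaceless (q : List String) (t : List Char) (h : ' ' ∉ t) :
    ' ' ∉ pvRender q t := by
  unfold pvRender
  split
  · simp [pvTagO, pvTagC]; exact fun hc => h hc
  · exact h

lemma pvStartsO_renderIff (q : List String) (t : List Char) :
    pvTagO <+: pvRender q t ↔ (pvM q t = true ∨ pvTagO <+: t) := by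
  unfold pvRender
  split
  · simp_all [List.prefix_append]
  · simp_all

lemma pvEndsC_renderIff (q : List String) (t : List Char) :
    pvTagC <:+ pvRender q t ↔ (pvM q t = true ∨ pvTagC <:+ t) := by
  unfold pvRender
  split
  · simp_all
    exact (List.suffix_append t pvTagC).trans (List.suffix_append pvTagO _)
  · simp_all

lemma pvStartsO_join (a : List Char) (l : List (List Char)) :
    pvTagO <+: PySem.Chars.join [' '] (a :: l) ↔ pvTagO <+: a := by
  rw [pvJoin_cons]
  rcases l with _ | ⟨b, l⟩
  · simp
  · rw [if_neg (by simp)]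
    exact pvStartsO_append a _

lemma pvTake_wtag (w : List Char) :
    (w ++ pvTagC).take ((w ++ pvTagC).length - 4) = w := by
  have h : (w ++ pvTagC).length - 4 = w.length := by simp [pvTagC]
  rw [h, List.take_left]

lemma pvHeadCond (q : List String) (t2 : List Char) (rest : List (List Char))
    (hch : List.IsChain (fun a b => ¬ pvBad q a b) (t2 :: rest)) (hm2 : pvM q t2 = true) :
    ∀ r3 ∈ rest.head?, pvTagO <+: r3 → pvM q r3 = true := by
  rcases rest with _ | ⟨r3, rest⟩
  · simp
  · intro r hr hO
    simp at hr
    subst hr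
    by_contra hm3
    exact (List.isChain_cons_cons.mp hch).1 ⟨⟨Or.inl hm2, Or.inr hO⟩, fun h => hm3 h.2⟩

lemma pvDropS (q : List String) (t2 : List Char) (rest : List (List Char)) (hm2 : pvM q t2 = true) :
    (PySem.Chars.join [' '] (pvRender q t2 :: rest.map (pvRender q))).drop 3 =
      PySem.Chars.join [' '] ((t2 ++ pvTagC) :: rest.map (pvRender q)) := by
  rw [pvJoin_cons, pvJoin_cons]
  unfold pvRender
  rw [if_pos hm2]
  simp [pvTagO]

lemma pvWtag_spaceless {w : List Char} (hw : ' ' ∉ w) : ' ' ∉ w ++ pvTagC := by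
  simp only [List.mem_append]
  rintro (h | h)
  · exact hw h
  · simp [pvTagC] at h

lemma pvJJ (q : List String) : ∀ n : Nat,
    (∀ ts : List (List Char), ts.length ≤ n → (∀ t ∈ ts, ' ' ∉ t) →
      List.IsChain (fun a b => ¬ pvBad q a b) ts →
      pvRepl (PySem.Chars.join [' '] (ts.map (pvRender q))) = pvBtop q ts) ∧
    (∀ (w : List Char) (ts : List (List Char)), ts.length ≤ n → ' ' ∉ w →
      (∀ t ∈ ts, ' ' ∉ t) → List.IsChain (fun a b => ¬ pvBad q a b) ts →
      (∀ t2 ∈ ts.head?, pvTagO <+: t2 → pvM q t2 = true) →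
      pvRepl (PySem.Chars.join [' '] ((w ++ pvTagC) :: ts.map (pvRender q))) =
        w ++ pvBsem q true ts) := by
  intro n
  induction n with
  | zero =>
    constructor
    · intro ts hlen _ _
      have : ts = [] := by cases ts <;> simp_all
      subst this
      simp [PySem.Chars.join_nil, pvRepl_nil, pvBtop]
    · intro w ts hlen hw _ _ _
      have : ts = [] := by cases ts <;> simp_all
      subst this
      rw [List.map_nil, PySem.Chars.join_singleton]
      rw [pvRepl_spaceless _ (pvWtag_spaceless hw)]
      simp [pvBsem]
  | succ n IH =>
    obtain ⟨ihn, ihm⟩ := IH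
    have hJn : ∀ ts : List (List Char), ts.length ≤ n + 1 → (∀ t ∈ ts, ' ' ∉ t) →
        List.IsChain (fun a b => ¬ pvBad q a b) ts →
        pvRepl (PySem.Chars.join [' '] (ts.map (pvRender q))) = pvBtop q ts := by
      intro ts hlen hsp hch
      rcases ts with _ | ⟨t1, _ | ⟨t2, rest⟩⟩
      · simp [PySem.Chars.join_nil, pvRepl_nil, pvBtop]
      · rw [List.map_cons, List.map_nil, PySem.Chars.join_singleton]
        rw [pvRepl_spaceless _ (pvRender_spaceless q t1 (hsp t1 (by simp)))]
        by_cases hm : pvM q t1 <;> simp [pvBtop, pvBsem, pvRender, hm]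
      · have hsp1 : ' ' ∉ t1 := hsp t1 (by simp)
        have hsp2 : ' ' ∉ t2 := hsp t2 (by simp)
        have hspr : ∀ t ∈ rest, ' ' ∉ t := fun t ht => hsp t (by simp [ht])
        obtain ⟨hgood, hch2⟩ := List.isChain_cons_cons.mp hch
        simp only [List.map_cons]
        rw [show pvRender q t1 :: pvRender q t2 :: rest.map (pvRender q) =
              pvRender q t1 :: (pvRender q t2 :: rest.map (pvRender q)) from rfl]
        rw [pvJoin_cons, if_neg (by simp)]
        rw [pvRepl_junction _ _ (pvRender_spaceless q t1 hsp1)]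
        by_cases hm1 : pvM q t1
        · by_cases hm2 : pvM q t2
          · rw [if_pos ⟨(pvEndsC_renderIff q t1).mpr (Or.inl hm1),
                (pvStartsO_join _ _).mpr ((pvStartsO_renderIff q t2).mpr (Or.inl hm2))⟩]
            rw [pvDropS q t2 rest hm2]
            rw [ihm t2 rest (by simp at hlen; omega) hsp2 hspr
                (hch2.tail) (pvHeadCond q t2 rest hch2 hm2)]
            have htake : (pvRender q t1).take ((pvRender q t1).length - 4) = pvTagO ++ t1 := by
              unfold pvRender
              rw [if_pos hm1]
              exact pvTake_wtag (pvTagO ++ t1)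
            rw [htake]
            simp [pvBtop, pvBsem, hm1, hm2]
          · rw [if_neg ?_]
            · have hn := ihn (t2 :: rest) (by simp at hlen ⊢; omega)
                (by intro t ht; rw [List.mem_cons] at ht; rcases ht with h | h; exacts [h ▸ hsp2, hspr t h]) hch2
              simp only [List.map_cons] at hn
              rw [hn]
              by_cases hm2' : pvM q t2 <;>
                simp [pvBtop, pvBsem, pvRender, hm1, hm2, hm2']
            · rintro ⟨-, hO⟩
              rw [pvStartsO_join, pvStartsO_renderIff] at hO
              rcases hO with h | h
              · exact hm2 h
              · exact hgood ⟨⟨Or.inl hm1, Or.inr h⟩, fun hx => hm2 hx.2⟩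
        · rw [if_neg ?_]
          · have hn := ihn (t2 :: rest) (by simp at hlen ⊢; omega)
              (by intro t ht; rw [List.mem_cons] at ht; rcases ht with h | h; exacts [h ▸ hsp2, hspr t h]) hch2
            simp only [List.map_cons] at hn
            rw [hn]
            by_cases hm2' : pvM q t2 <;>
              simp [pvBtop, pvBsem, pvRender, hm1, hm2']
          · rintro ⟨hC, hO⟩
            rw [pvEndsC_renderIff] at hC
            rcases hC with h | h
            · exact hm1 h
            · rw [pvStartsO_join, pvStartsO_renderIff] at hO
              exact hgood ⟨⟨Or.inr h, hO⟩, fun hx => hm1 hx.1⟩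
    have hJm : ∀ (w : List Char) (ts : List (List Char)), ts.length ≤ n + 1 → ' ' ∉ w →
        (∀ t ∈ ts, ' ' ∉ t) → List.IsChain (fun a b => ¬ pvBad q a b) ts →
        (∀ t2 ∈ ts.head?, pvTagO <+: t2 → pvM q t2 = true) →
        pvRepl (PySem.Chars.join [' '] ((w ++ pvTagC) :: ts.map (pvRender q))) =
          w ++ pvBsem q true ts := by
      intro w ts hlen hw hsp hch hhd
      rcases ts with _ | ⟨t2, rest⟩
      · rw [List.map_nil, PySem.Chars.join_singleton]
        rw [pvRepl_spaceless _ (pvWtag_spaceless hw)]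
        simp [pvBsem]
      · have hsp2 : ' ' ∉ t2 := hsp t2 (by simp)
        have hspr : ∀ t ∈ rest, ' ' ∉ t := fun t ht => hsp t (by simp [ht])
        simp only [List.map_cons]
        rw [pvJoin_cons (a := w ++ pvTagC), if_neg (by simp)]
        rw [pvRepl_junction _ _ (pvWtag_spaceless hw)]
        by_cases hm2 : pvM q t2
        · rw [if_pos ⟨List.suffix_append w pvTagC,
              (pvStartsO_join _ _).mpr ((pvStartsO_renderIff q t2).mpr (Or.inl hm2))⟩]
          rw [pvDropS q t2 rest hm2]
          rw [ihm t2 rest (by simp at hlen; omega) hsp2 hspr hch.tail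
              (pvHeadCond q t2 rest hch hm2)]
          rw [pvTake_wtag w]
          simp [pvBsem, hm2]
        · rw [if_neg ?_]
          · have hn := hJn (t2 :: rest) (by simpa using hlen)
              (by intro t ht; rw [List.mem_cons] at ht; rcases ht with h | h; exacts [h ▸ hsp2, hspr t h]) hch
            simp only [List.map_cons] at hn
            rw [hn]
            by_cases hm2' : pvM q t2 <;>
              simp [pvBtop, pvBsem, pvRender, hm2, hm2']
          · rintro ⟨-, hO⟩
            rw [pvStartsO_join, pvStartsO_renderIff] at hO
            rcases hO with h | h
            · exact hm2 h
            · exact hm2 (hhd t2 (by simp) h)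
    exact ⟨hJn, hJm⟩

lemma pvTop (q : List String) (ts : List (List Char)) :
    PySem.Chars.join [' '] (pvRuns q [] ts) = pvBtop q ts := by
  rcases ts with _ | ⟨w, ts⟩
  · simp [pvRuns, pvBtop, PySem.Chars.join_nil]
  · by_cases hm : pvM q w
    · rw [show pvRuns q [] (w :: ts) = pvRuns q [w] ts by simp [pvRuns, hm]]
      rw [(pvSB q ts).1 [w] (by simp), PySem.Chars.join_singleton]
      simp [pvBtop, hm]
    · rw [show pvRuns q [] (w :: ts) = w :: pvRuns q [] ts by simp [pvRuns, hm]]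
      rw [pvJoin_cons]
      by_cases he : pvRuns q [] ts = []
      · rw [if_pos he]
        have h2 := (pvSB q ts).2
        rw [if_pos he] at h2
        simp [pvBtop, hm, ← h2]
      · rw [if_neg he]
        have h2 := (pvSB q ts).2
        rw [if_neg he] at h2
        rw [h2]
        simp [pvBtop, hm]


lemma pvChainOfZip (q : List String) : ∀ ts : List (List Char),
    (∀ p ∈ ts.zip ts.tail, ¬ pvBad q p.1 p.2) →
    List.IsChain (fun a b => ¬ pvBad q a b) ts := by
  intro ts
  induction ts with
  | nil => intro _; exact List.IsChain.nil
  | cons a ts ih =>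
    intro h
    rcases ts with _ | ⟨b, r⟩
    · exact List.isChain_singleton a
    · refine List.isChain_cons_cons.mpr ⟨h (a, b) (by simp), ih ?_⟩
      intro p hp
      exact h p (by simp at hp ⊢; tauto)

lemma pvChainOfNotD (query_terms : List String) (snippet : String)
    (hnd : ¬ D_snippet_highlight snippet query_terms) :
    List.IsChain (fun a b => ¬ pvBad query_terms a b) (PySem.Chars.split₀ snippet.toList) := by
  apply pvChainOfZip
  intro p hp hbad
  apply hnd
  unfold D_snippet_highlight
  rw [List.any_eq_true]
  refine ⟨p, hp, ?_⟩
  obtain ⟨⟨h1, h2⟩, h3⟩ := hbad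
  simp only [Bool.and_eq_true, Bool.or_eq_true, Bool.not_eq_true', Bool.and_eq_false_iff]
  refine ⟨⟨?_, ?_⟩, ?_⟩
  · rcases h1 with h | h
    · exact Or.inl h
    · exact Or.inr ((PySem.Chars.endswith_iff _ _).mpr h)
  · rcases h2 with h | h
    · exact Or.inl h
    · exact Or.inr ((PySem.Chars.startswith_iff _ _).mpr h)
  · by_contra hc
    rw [not_or, Bool.not_eq_false, Bool.not_eq_false] at hc
    exact h3 hc

lemma pvFinal (snippet : String) (q : List String)
    (hch : List.IsChain (fun a b => ¬ pvBad q a b) (PySem.Chars.split₀ snippet.toList)) :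
    snippet_highlight snippet q = snippet_highlight_alt snippet q := by
  unfold snippet_highlight snippet_highlight_alt
  simp only []
  rw [pvAfold q]
  rw [show ("</b> <b>".toList) = pvPat from rfl, show (" ".toList) = [' '] from rfl]
  rw [pvReplace_eq]
  rw [(pvJJ q (PySem.Chars.split₀ snippet.toList).length).1 _ (le_refl _)
    (pvSplit_nospace snippet.toList) hch]
  have hb := pvBfold q (PySem.Chars.split₀ snippet.toList) [] []
  simp only [] at hb
  rw [hb, List.nil_append, pvTop]

-- ===== VERDICT (by name: the statement is the Claim_ definition above) =====
theorem snippet_highlight_spec : Claim_unchanged_snippet_highlight := by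
  intro snippet query_terms _ hnd
  exact pvFinal snippet query_terms (pvChainOfNotD query_terms _ hnd)

theorem snippet_highlight_changed : Claim_changed_snippet_highlight := by
  unfold Claim_changed_snippet_highlight; decide
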